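-- pv_equiv track=rewrite | github.com/jcohen66/python-sorting | arrays/spiral_traversal_two_dim.py | walk_perimeter
-- ===== SOURCE A (Python) =====
-- def walk_perimeter(array, result, start_row, start_col, end_row, end_col):
--     # keep row same, increate col until reach col count
--
--     # top border
--     for col in range(start_col, end_col + 1):
--         result.append(array[start_row][col])
--
--     # right side border
--     for row in range(start_row + 1, end_row + 1):
--         result.append(array[row][end_col])
--
--     # bottom border
--     for col in range(end_col - 1, start_col - 1, -1):
--         # edge case for single row
--         if start_row == end_row:
--             break
--         result.append(array[end_row][col])
--
--     # left side border
--     for row in range(end_row - 1, start_row, -1):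
--         # edge case for single column
--         if start_col == end_col:
--             break
--         result.append(array[row][start_col])
--
--     return result
-- ===== SOURCE B (Python) =====
-- def walk_perimeter(array, result, start_row, start_col, end_row, end_col):
--     # count-based clockwise walk: compute how many perimeter cells to emit,
--     # then walk a single loop turning clockwise at the box boundary.
--     height = end_row - start_row
--     width = end_col - start_col
--     if height == 0 or width == 0:
--         count = (height + 1) * (width + 1)
--     else:
--         count = 2 * (height + width)
--     r, c = start_row, start_col
--     dr, dc = 0, 1
--     for _ in range(count):
--         result.append(array[r][c])
--         if not (start_row <= r + dr <= end_row and start_col <= c + dc <= end_col):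
--             dr, dc = dc, -dr  # rotate clockwise
--         r, c = r + dr, c + dc
--     return result
-- ===== Notes on version B (the rewrite author's own statement) =====
-- stated objective: alternative
-- what changed: Replaces A's four separate border loops (with in-loop break guards for single-row/column) by a single count-based walk: B computes the number of perimeter cells once and then advances one cursor, rotating its direction clockwise whenever the next cell would leave the box.
-- outside the precondition, e.g. on walk_perimeter([[1, 2], [3, 4]], [], 1, 0, 0, 1): A returns [3, 4, 1], B returns []; on walk_perimeter([[1, 2], [3, 4]], [], 0, 1, 1, 0): A returns [3], B returns []
import Mathlib
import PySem

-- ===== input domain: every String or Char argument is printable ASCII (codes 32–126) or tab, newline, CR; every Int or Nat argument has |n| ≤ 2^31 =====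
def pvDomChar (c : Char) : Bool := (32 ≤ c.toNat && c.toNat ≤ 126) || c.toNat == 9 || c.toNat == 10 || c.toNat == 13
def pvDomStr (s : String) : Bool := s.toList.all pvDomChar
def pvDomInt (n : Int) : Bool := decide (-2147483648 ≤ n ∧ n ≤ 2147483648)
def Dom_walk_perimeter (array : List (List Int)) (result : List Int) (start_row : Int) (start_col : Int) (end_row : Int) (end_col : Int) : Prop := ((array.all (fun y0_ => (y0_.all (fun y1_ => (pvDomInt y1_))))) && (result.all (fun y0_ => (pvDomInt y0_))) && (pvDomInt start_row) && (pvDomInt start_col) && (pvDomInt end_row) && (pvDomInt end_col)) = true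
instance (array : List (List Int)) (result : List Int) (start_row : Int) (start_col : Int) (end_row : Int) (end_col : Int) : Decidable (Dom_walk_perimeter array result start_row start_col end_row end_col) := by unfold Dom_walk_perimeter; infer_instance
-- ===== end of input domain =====

-- B replaces A's four border loops by a single count-based clockwise walk (alternative decomposition,
-- same cost); A and B both mutate `result` in place in Python — the equivalence proved here is about
-- the returned list value (B performs the same appends).

-- ===== PORT A =====
-- shared cell access array[r][c]; the default is never reached under Pre_
def pvCell (array : List (List Int)) (r c : Int) : Int :=
  PySem.List.pyGetD (PySem.List.pyGetD array r []) c 0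

def walk_perimeter (array : List (List Int)) (result : List Int) (start_row : Int) (start_col : Int) (end_row : Int) (end_col : Int) : List Int :=
  -- top border
  let r1 := (PySem.List.pyRange start_col (end_col + 1) 1).foldl
    (fun acc col => acc ++ [pvCell array start_row col]) result
  -- right side border
  let r2 := (PySem.List.pyRange (start_row + 1) (end_row + 1) 1).foldl
    (fun acc row => acc ++ [pvCell array row end_col]) r1
  -- bottom border (break on single row: no element is appended)
  let r3 := (PySem.List.pyRange (end_col - 1) (start_col - 1) (-1)).foldl
    (fun acc col => if start_row = end_row then acc else acc ++ [pvCell array end_row col]) r2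
  -- left side border (break on single column: no element is appended)
  let r4 := (PySem.List.pyRange (end_row - 1) start_row (-1)).foldl
    (fun acc row => if start_col = end_col then acc else acc ++ [pvCell array row start_col]) r3
  r4

-- ===== PORT B =====
-- the walk loop: emit array[r][c], rotate the direction clockwise if the next cell leaves the box
def pvWalk (array : List (List Int)) (sr sc er ec : Int) :
    Nat → Int → Int → Int → Int → List Int → List Int
  | 0, _, _, _, _, acc => acc
  | n + 1, r, c, dr, dc, acc =>
    let acc' := acc ++ [pvCell array r c]
    if sr ≤ r + dr ∧ r + dr ≤ er ∧ sc ≤ c + dc ∧ c + dc ≤ ec then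
      pvWalk array sr sc er ec n (r + dr) (c + dc) dr dc acc'
    else
      pvWalk array sr sc er ec n (r + dc) (c + (-dr)) dc (-dr) acc'

def walk_perimeter_alt (array : List (List Int)) (result : List Int) (start_row : Int) (start_col : Int) (end_row : Int) (end_col : Int) : List Int :=
  let height := end_row - start_row
  let width := end_col - start_col
  let count : Int :=
    if height = 0 ∨ width = 0 then (height + 1) * (width + 1) else 2 * (height + width)
  pvWalk array start_row start_col end_row end_col count.toNat start_row start_col 0 1 result

-- ===== PRECONDITION & SPEC =====
-- Pre_ is A's Python domain (all perimeter accesses are valid Python indices, possibly negative)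
-- on the natural spiral orderings start ≤ end, plus the doubly-inverted region (both start > end,
-- where A appends nothing) and a single row with inverted columns (again nothing appended); it excludes inputs where A raises IndexError and half-inverted bounds
-- (start_col > end_col with several rows, or start_row > end_row with start_col ≤ end_col), degenerate calls no caller of a
-- spiral traversal would specify, on which A's partial borders are an accident of its loop ranges.
def Pre_walk_perimeter (array : List (List Int)) (result : List Int) (start_row : Int) (start_col : Int) (end_row : Int) (end_col : Int) : Prop :=
  (start_row ≤ end_row ∧ start_col ≤ end_col ∧
   -(array.length : Int) ≤ start_row ∧ end_row < (array.length : Int) ∧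
   ∀ r ∈ PySem.List.pyRange start_row (end_row + 1) 1,
     -(((PySem.List.pyGetD array r []).length : Int)) ≤ start_col ∧
     end_col < ((PySem.List.pyGetD array r []).length : Int)) ∨
  (end_row < start_row ∧ end_col < start_col) ∨
  (start_row = end_row ∧ end_col < start_col)
instance (array : List (List Int)) (result : List Int) (start_row : Int) (start_col : Int) (end_row : Int) (end_col : Int) : Decidable (Pre_walk_perimeter array result start_row start_col end_row end_col) := by unfold Pre_walk_perimeter; infer_instance

def pvWitness_walk_perimeter : List (List Int) × List Int × Int × Int × Int × Int :=
  ([[1, 2], [3, 4]], [0], 0, 0, 1, 1)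

def Spec_walk_perimeter (array : List (List Int)) (result : List Int) (start_row : Int) (start_col : Int) (end_row : Int) (end_col : Int) (out : List Int) : Prop := out = walk_perimeter_alt array result start_row start_col end_row end_col
instance (array : List (List Int)) (result : List Int) (start_row : Int) (start_col : Int) (end_row : Int) (end_col : Int) (out : List Int) : Decidable (Spec_walk_perimeter array result start_row start_col end_row end_col out) := by unfold Spec_walk_perimeter; infer_instance

-- ===== CLAIM (what is proved, stated in full; the proofs are below) =====
def Claim_equal_walk_perimeter : Prop := ∀ (array : List (List Int)) (result : List Int) (start_row : Int) (start_col : Int) (end_row : Int) (end_col : Int), Dom_walk_perimeter array result start_row start_col end_row end_col → Pre_walk_perimeter array result start_row start_col end_row end_col → Spec_walk_perimeter array result start_row start_col end_row end_col (walk_perimeter array result start_row start_col end_row end_col)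

-- ===== LEMMAS AND PROOFS =====

theorem pvWalk_succ (array : List (List Int)) (sr sc er ec : Int) (n : Nat)
    (r c dr dc : Int) (acc : List Int) :
    pvWalk array sr sc er ec (n + 1) r c dr dc acc
      = if sr ≤ r + dr ∧ r + dr ≤ er ∧ sc ≤ c + dc ∧ c + dc ≤ ec then
          pvWalk array sr sc er ec n (r + dr) (c + dc) dr dc (acc ++ [pvCell array r c])
        else
          pvWalk array sr sc er ec n (r + dc) (c + -dr) dc (-dr) (acc ++ [pvCell array r c]) := rfl

theorem pvWalk_zero (array : List (List Int)) (sr sc er ec : Int)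
    (r c dr dc : Int) (acc : List Int) :
    pvWalk array sr sc er ec 0 r c dr dc acc = acc := rfl

theorem foldl_keep (l : List Int) (acc : List Int) :
    l.foldl (fun a (_ : Int) => a) acc = acc := by
  induction l generalizing acc with
  | nil => rfl
  | cons x xs ih => exact ih acc

-- A's bottom/left loops: the break guard either skips every element or appends them all
theorem foldl_break (P : Prop) [Decidable P] (g : Int → Int) (l : List Int) (acc : List Int) :
    l.foldl (fun a x => if P then a else a ++ [g x]) acc
      = if P then acc else acc ++ l.map g := by
  by_cases h : P
  · simp only [if_pos h]
    exact foldl_keep l acc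
  · simp only [if_neg h]
    rw [PySem.List.foldl_append_singleton_eq_map]

-- rightward run along the top row: k+1 emissions from (sr,c) to (sr,ec), then the cursor has turned down
theorem pv_run_right (array : List (List Int)) (sr sc er ec : Int) (her : sr ≤ er)
    (k : Nat) (c : Int) (hc : c + k = ec) (hsc : sc ≤ c) (fuel : Nat) (acc : List Int) :
    pvWalk array sr sc er ec (k + 1 + fuel) sr c 0 1 acc
      = pvWalk array sr sc er ec fuel (sr + 1) ec 1 0
          (acc ++ (PySem.List.pyRange c (ec + 1) 1).map (fun col => pvCell array sr col)) := by
  induction k generalizing c acc with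
  | zero =>
    obtain rfl : c = ec := by omega
    rw [show 0 + 1 + fuel = fuel + 1 from by omega, pvWalk_succ]
    rw [if_neg (by omega)]
    simp only [neg_zero, add_zero]
    rw [PySem.List.pyRange_one_cons (by omega), PySem.List.pyRange_one_eq_nil (by omega)]
    simp
  | succ n ih =>
    rw [show n + 1 + 1 + fuel = (n + 1 + fuel) + 1 from by omega, pvWalk_succ]
    rw [if_pos ⟨by omega, by omega, by omega, by omega⟩]
    simp only [add_zero]
    rw [ih (c + 1) (by omega) (by omega)]
    rw [PySem.List.pyRange_one_cons (by omega : c < ec + 1)]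
    simp

-- downward run along the right column: k+1 emissions from (r,ec) to (er,ec), then the cursor has turned left
theorem pv_run_down (array : List (List Int)) (sr sc er ec : Int) (hec : sc ≤ ec)
    (k : Nat) (r : Int) (hr : r + k = er) (hsr : sr ≤ r) (fuel : Nat) (acc : List Int) :
    pvWalk array sr sc er ec (k + 1 + fuel) r ec 1 0 acc
      = pvWalk array sr sc er ec fuel er (ec - 1) 0 (-1)
          (acc ++ (PySem.List.pyRange r (er + 1) 1).map (fun row => pvCell array row ec)) := by
  induction k generalizing r acc with
  | zero =>
    obtain rfl : r = er := by omega
    rw [show 0 + 1 + fuel = fuel + 1 from by omega, pvWalk_succ]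
    rw [if_neg (by omega)]
    simp only [add_zero]
    rw [PySem.List.pyRange_one_cons (by omega), PySem.List.pyRange_one_eq_nil (by omega)]
    simp [sub_eq_add_neg]
  | succ n ih =>
    rw [show n + 1 + 1 + fuel = (n + 1 + fuel) + 1 from by omega, pvWalk_succ]
    rw [if_pos ⟨by omega, by omega, by omega, by omega⟩]
    simp only [add_zero]
    rw [ih (r + 1) (by omega) (by omega)]
    rw [PySem.List.pyRange_one_cons (by omega : r < er + 1)]
    simp

-- leftward run along the bottom row: k+1 emissions from (er,c) down-to (er,sc), then the cursor has turned up
theorem pv_run_left (array : List (List Int)) (sr sc er ec : Int) (her : sr ≤ er)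
    (k : Nat) (c : Int) (hc : sc + k = c) (hce : c ≤ ec) (fuel : Nat) (acc : List Int) :
    pvWalk array sr sc er ec (k + 1 + fuel) er c 0 (-1) acc
      = pvWalk array sr sc er ec fuel (er - 1) sc (-1) 0
          (acc ++ (PySem.List.pyRange c (sc - 1) (-1)).map (fun col => pvCell array er col)) := by
  induction k generalizing c acc with
  | zero =>
    obtain rfl : c = sc := by omega
    rw [show 0 + 1 + fuel = fuel + 1 from by omega, pvWalk_succ]
    rw [if_neg (by omega)]
    simp only [neg_zero, add_zero]
    rw [PySem.List.pyRange_neg_one_cons (by omega), PySem.List.pyRange_neg_one_eq_nil (by omega)]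
    simp [sub_eq_add_neg]
  | succ n ih =>
    rw [show n + 1 + 1 + fuel = (n + 1 + fuel) + 1 from by omega, pvWalk_succ]
    rw [if_pos ⟨by omega, by omega, by omega, by omega⟩]
    simp only [add_zero]
    rw [ih (c + -1) (by omega) (by omega)]
    rw [PySem.List.pyRange_neg_one_cons (by omega : sc - 1 < c)]
    rw [show (c - 1 : Int) = c + -1 from by ring]
    simp

-- upward run along the left column with exactly k emissions, rows r down-to r-k+1
theorem pv_run_up (array : List (List Int)) (sr sc er ec : Int) (hec : sc ≤ ec)
    (k : Nat) (r : Int) (hk : sr + k ≤ r + 1) (hre : r ≤ er) (acc : List Int) :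
    pvWalk array sr sc er ec k r sc (-1) 0 acc
      = acc ++ (PySem.List.pyRange r (r - k) (-1)).map (fun row => pvCell array row sc) := by
  induction k generalizing r acc with
  | zero =>
    rw [pvWalk_zero, PySem.List.pyRange_neg_one_eq_nil (by omega)]
    simp
  | succ n ih =>
    rw [pvWalk_succ]
    rw [PySem.List.pyRange_neg_one_cons (by omega : r - ((n : Nat) + 1 : Nat) < r)]
    by_cases hn : n = 0
    · subst hn
      have hnil : PySem.List.pyRange (r - 1) (r - ((0 : Nat) + 1 : Nat)) (-1) = [] :=
        PySem.List.pyRange_neg_one_eq_nil (by omega)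
      rcases lt_or_ge (r + -1) sr with h | h
      · rw [if_neg (by omega), pvWalk_zero, hnil]
        simp
      · rw [if_pos ⟨by omega, by omega, by omega, by omega⟩, pvWalk_zero, hnil]
        simp
    · rw [if_pos ⟨by omega, by omega, by omega, by omega⟩]
      simp only [add_zero]
      rw [ih (r + -1) (by omega) (by omega)]
      rw [show (r + -1 : Int) - ((n : Nat) : Int) = r - (((n : Nat) + 1 : Nat) : Int) from by
        push_cast; ring]
      rw [show (r - 1 : Int) = r + -1 from by ring]
      simp

theorem walk_perimeter_spec_aux (array : List (List Int)) (result : List Int)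
    (sr sc er ec : Int) (h1 : sr ≤ er) (h2 : sc ≤ ec) :
    walk_perimeter array result sr sc er ec = walk_perimeter_alt array result sr sc er ec := by
  simp only [walk_perimeter, walk_perimeter_alt]
  rw [PySem.List.foldl_append_singleton_eq_map, PySem.List.foldl_append_singleton_eq_map]
  rw [foldl_break (sr = er), foldl_break (sc = ec)]
  by_cases hr : sr = er
  · -- single row
    subst hr
    rw [if_pos rfl, if_pos (Or.inl (by omega))]
    have hcnt : ((sr - sr + 1) * (ec - sc + 1)).toNat = (ec - sc).toNat + 1 + 0 := by
      have h : (sr - sr + 1) * (ec - sc + 1) = ec - sc + 1 := by ring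
      rw [h]; omega
    rw [hcnt, pv_run_right array sr sc sr ec le_rfl (ec - sc).toNat sc (by omega) le_rfl 0 result]
    rw [pvWalk_zero]
    rw [PySem.List.pyRange_one_eq_nil (by omega : sr + 1 ≤ sr + 1)]
    by_cases hc : sc = ec
    · rw [if_pos hc]
      simp
    · rw [if_neg hc]
      rw [PySem.List.pyRange_neg_one_eq_nil (by omega : sr - 1 ≤ sr)]
      simp
  · by_cases hc : sc = ec
    · -- single column, more than one row
      subst hc
      rw [if_neg hr, if_pos rfl, if_pos (Or.inr (by omega))]
      have hcnt : ((er - sr + 1) * (sc - sc + 1)).toNat = (((er - sr).toNat - 1) + 1 + 0) + 1 := by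
        have h : (er - sr + 1) * (sc - sc + 1) = er - sr + 1 := by ring
        rw [h]; omega
      rw [hcnt, pvWalk_succ]
      rw [if_neg (by omega)]
      simp only [neg_zero, add_zero]
      rw [pv_run_down array sr sc er sc le_rfl ((er - sr).toNat - 1) (sr + 1) (by omega) (by omega) 0]
      rw [pvWalk_zero]
      rw [PySem.List.pyRange_neg_one_eq_nil (by omega : sc - 1 ≤ sc - 1)]
      rw [PySem.List.pyRange_one_singleton]
      simp
    · -- proper rectangle
      rw [if_neg hr, if_neg hc, if_neg (by omega)]
      have hcnt : (2 * ((er - sr) + (ec - sc))).toNat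
          = (ec - sc).toNat + 1 + ((((er - sr).toNat - 1) + 1) + (((((ec - sc).toNat - 1) + 1)) + ((er - sr).toNat - 1))) := by
        omega
      rw [hcnt, pv_run_right array sr sc er ec (by omega) (ec - sc).toNat sc (by omega) le_rfl]
      rw [pv_run_down array sr sc er ec (by omega) ((er - sr).toNat - 1) (sr + 1) (by omega) (by omega)]
      rw [pv_run_left array sr sc er ec (by omega) ((ec - sc).toNat - 1) (ec - 1) (by omega) (by omega)]
      rw [pv_run_up array sr sc er ec (by omega) ((er - sr).toNat - 1) (er - 1) (by omega) (by omega)]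
      rw [show er - 1 - ((((er - sr).toNat - 1 : Nat) : Int)) = sr from by omega]

-- ===== VERDICT (by name: the statement is the Claim_ definition above) =====
-- on the doubly-inverted region every loop of A is empty and B's cell count is nonpositive
theorem walk_perimeter_spec_aux2 (array : List (List Int)) (result : List Int)
    (sr sc er ec : Int) (h1 : er < sr) (h2 : ec < sc) :
    walk_perimeter array result sr sc er ec = walk_perimeter_alt array result sr sc er ec := by
  simp only [walk_perimeter, walk_perimeter_alt]
  rw [if_neg (by omega)]
  rw [show (2 * ((er - sr) + (ec - sc))).toNat = 0 from by omega, pvWalk_zero]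
  rw [PySem.List.pyRange_one_eq_nil (by omega : ec + 1 ≤ sc),
      PySem.List.pyRange_one_eq_nil (by omega : er + 1 ≤ sr + 1),
      PySem.List.pyRange_neg_one_eq_nil (by omega : ec - 1 ≤ sc - 1),
      PySem.List.pyRange_neg_one_eq_nil (by omega : er - 1 ≤ sr)]
  simp

-- single row with inverted columns: every loop of A is empty and B's cell count is nonpositive
theorem walk_perimeter_spec_aux3 (array : List (List Int)) (result : List Int)
    (sr sc er ec : Int) (h1 : sr = er) (h2 : ec < sc) :
    walk_perimeter array result sr sc er ec = walk_perimeter_alt array result sr sc er ec := by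
  subst h1
  simp only [walk_perimeter, walk_perimeter_alt]
  rw [if_pos (Or.inl (by omega))]
  rw [show ((sr - sr + 1) * (ec - sc + 1)).toNat = 0 from by
    have h : (sr - sr + 1) * (ec - sc + 1) = ec - sc + 1 := by ring
    rw [h]; omega, pvWalk_zero]
  rw [PySem.List.pyRange_one_eq_nil (by omega : ec + 1 ≤ sc),
      PySem.List.pyRange_one_eq_nil (by omega : sr + 1 ≤ sr + 1),
      PySem.List.pyRange_neg_one_eq_nil (by omega : ec - 1 ≤ sc - 1),
      PySem.List.pyRange_neg_one_eq_nil (by omega : sr - 1 ≤ sr)]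
  simp

theorem walk_perimeter_spec : Claim_equal_walk_perimeter := by
  intro array result sr sc er ec _hdom hpre
  unfold Spec_walk_perimeter
  rcases hpre with ⟨ha, hb, -⟩ | ⟨ha, hb⟩ | ⟨ha, hb⟩
  · exact walk_perimeter_spec_aux array result sr sc er ec ha hb
  · exact walk_perimeter_spec_aux2 array result sr sc er ec ha hb
  · exact walk_perimeter_spec_aux3 array result sr sc er ec ha hb
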